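-- pv_equiv track=rewrite | github.com/GitHubLHAn/Bootloader_Sw_Application | App_Bootloader_FOTA_bySerial/app_bld.py | reverse_chunks_of_four
-- ===== SOURCE A (Python) =====
-- def reverse_chunks_of_four(arr):
--     if len(arr) % 4 != 0:
--         raise ValueError("-> So luong phan tu trong chuoi data khong chia het cho 4")
--
--     result = []
--     for i in range(0, len(arr), 4):
--         chunk = arr[i:i+4]
--         result.extend(chunk[::-1])
--     return result
-- ===== SOURCE B (Python) =====
-- def reverse_chunks_of_four(arr):
--     if len(arr) % 4 != 0:
--         raise ValueError("-> So luong phan tu trong chuoi data khong chia het cho 4")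
--     it = iter(arr)
--     out = []
--     for a, b, c, d in zip(it, it, it, it):
--         out += (d, c, b, a)
--     return out
-- ===== Notes on version B (the rewrite author's own statement) =====
-- stated objective: idiomatic
-- what changed: B consumes the input four elements at a time via zip over a single iterator with tuple destructuring (a structural 4-way recursion in the port), instead of A's index-stepped loop with slicing and slice-reversal.
import Mathlib
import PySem

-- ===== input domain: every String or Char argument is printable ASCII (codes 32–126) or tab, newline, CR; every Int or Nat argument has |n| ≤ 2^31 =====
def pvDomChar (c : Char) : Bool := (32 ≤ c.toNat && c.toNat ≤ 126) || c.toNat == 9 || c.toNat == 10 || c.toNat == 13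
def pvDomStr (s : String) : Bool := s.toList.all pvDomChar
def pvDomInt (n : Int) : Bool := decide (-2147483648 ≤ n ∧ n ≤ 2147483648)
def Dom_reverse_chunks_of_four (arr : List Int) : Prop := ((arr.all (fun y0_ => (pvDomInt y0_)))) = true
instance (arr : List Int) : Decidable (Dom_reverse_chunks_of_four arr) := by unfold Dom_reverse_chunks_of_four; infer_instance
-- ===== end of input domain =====

-- B consumes the input four elements at a time (zip over one iterator, tuple destructuring);
-- objective: idiomatic, same O(n) cost; no slicing or index arithmetic.

-- ===== PORT A =====
-- Python A: guard len%4 (raises ValueError otherwise — excluded by Pre_, port returns []),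
-- then for i in range(0, len(arr), 4): result.extend(arr[i:i+4][::-1]).
-- chunk[::-1] on a slice is its reversal: ported as .reverse.
def reverse_chunks_of_four (arr : List Int) : List Int :=
  if arr.length % 4 ≠ 0 then []   -- Python raises ValueError here; excluded by Pre_
  else (PySem.List.pyRange 0 (arr.length : Int) 4).foldl
    (fun result i => result ++ (PySem.List.slice arr (some i) (some (i + 4))).reverse) []

-- ===== PORT B =====
-- Python B: same guard, then 'for a, b, c, d in zip(it, it, it, it): out += (d, c, b, a)'.
-- zip over a single iterator yields consecutive quadruples and stops when fewer than 4 remain: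
-- ported as the 4-way structural recursion emitting each quadruple reversed, in order.
def revQuads : List Int → List Int
  | a :: b :: c :: d :: rest => d :: c :: b :: a :: revQuads rest
  | _ => []

def reverse_chunks_of_four_alt (arr : List Int) : List Int :=
  if arr.length % 4 ≠ 0 then []   -- Python raises ValueError here; excluded by Pre_
  else revQuads arr

-- ===== PRECONDITION & SPEC =====
-- A raises ValueError exactly when the length is not a multiple of 4; B raises there too.
def Pre_reverse_chunks_of_four (arr : List Int) : Prop := arr.length % 4 = 0
instance (arr : List Int) : Decidable (Pre_reverse_chunks_of_four arr) := by
  unfold Pre_reverse_chunks_of_four; infer_instance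

def pvWitness_reverse_chunks_of_four : List Int := [1, 2, 3, 4, 5, 6, 7, 8]

def Spec_reverse_chunks_of_four (arr : List Int) (out : List Int) : Prop :=
  out = reverse_chunks_of_four_alt arr
instance (arr : List Int) (out : List Int) : Decidable (Spec_reverse_chunks_of_four arr out) := by
  unfold Spec_reverse_chunks_of_four; infer_instance

-- ===== CLAIM (what is proved, stated in full; the proofs are below) =====
def Claim_equal_reverse_chunks_of_four : Prop := ∀ (arr : List Int),
  Dom_reverse_chunks_of_four arr → Pre_reverse_chunks_of_four arr →
  Spec_reverse_chunks_of_four arr (reverse_chunks_of_four arr)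

-- ===== LEMMAS AND PROOFS =====

lemma revQuads_append4 : ∀ xs : List Int, xs.length % 4 = 0 → ∀ a b c d : Int,
    revQuads (xs ++ [a, b, c, d]) = revQuads xs ++ [d, c, b, a] := by
  intro xs
  induction xs using revQuads.induct with
  | case1 p q r s rest ih =>
    intro h a b c d
    simp only [List.length_cons] at h
    simp only [List.cons_append, revQuads, ih (by omega) a b c d]
  | case2 xs h2 =>
    intro h a b c d
    rcases xs with _|⟨p,_|⟨q,_|⟨r,_|⟨s,rest⟩⟩⟩⟩
    · rfl
    · simp at h
    · simp at h
    · simp at h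
    · exact absurd rfl (h2 p q r s rest)

lemma list_len4 (l : List Int) (h : l.length = 4) : ∃ a b c d : Int, l = [a, b, c, d] := by
  rcases l with _|⟨a,_|⟨b,_|⟨c,_|⟨d,_|⟨e,r⟩⟩⟩⟩⟩ <;> simp_all

lemma foldA (arr : List Int) : ∀ m : Nat, 4 * m ≤ arr.length →
    (List.range m).foldl
      (fun (result : List Int) (k : Nat) => result ++ (PySem.List.slice arr (some (4 * (k : Int))) (some (4 * (k : Int) + 4))).reverse) []
    = revQuads (arr.take (4 * m)) := by
  intro m
  induction m with
  | zero => intro _; rfl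
  | succ m ih =>
    intro h
    rw [List.range_succ, List.foldl_append, ih (by omega)]
    have hc1 : (4 * (m : Int)) = ((4 * m : Nat) : Int) := by push_cast; ring
    have hc2 : (4 * (m : Int) + 4) = ((4 * m : Nat) : Int) + ((4 : Nat) : Int) := by push_cast; ring
    have hs : PySem.List.slice arr (some (4 * (m : Int))) (some (4 * (m : Int) + 4))
        = (arr.drop (4 * m)).take 4 := by
      rw [hc2, hc1]; exact PySem.List.slice_natCast_add arr (4 * m) 4
    simp only [List.foldl_cons, List.foldl_nil, hs]
    obtain ⟨a, b, c, d, habcd⟩ := list_len4 ((arr.drop (4 * m)).take 4) (by simp; omega)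
    have htake : arr.take (4 * (m + 1)) = arr.take (4 * m) ++ [a, b, c, d] := by
      rw [show 4 * (m + 1) = 4 * m + 4 by ring, List.take_add, habcd]
    rw [habcd, htake, revQuads_append4 _ (by simp; omega)]
    simp

lemma A_eq_revQuads (arr : List Int) (h : arr.length % 4 = 0) :
    reverse_chunks_of_four arr = revQuads arr := by
  obtain ⟨m, hm⟩ : ∃ m, arr.length = 4 * m := ⟨arr.length / 4, by omega⟩
  unfold reverse_chunks_of_four
  rw [if_neg (by omega)]
  rw [PySem.List.pyRange_of_pos 0 (arr.length : Int) (by norm_num)]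
  have hcount : (if (0 : Int) < (arr.length : Int) then
      (((arr.length : Int) - 0 + 4 - 1) / 4).toNat else 0) = m := by
    rw [hm]
    by_cases hm0 : m = 0
    · simp [hm0]
    · rw [if_pos (by push_cast; omega)]
      push_cast
      omega
  rw [hcount, List.foldl_map]
  simp only [zero_add]
  rw [foldA arr m (by omega)]
  rw [← hm, List.take_length]

-- ===== VERDICT (by name: the statement is the Claim_ definition above) =====
theorem reverse_chunks_of_four_spec : Claim_equal_reverse_chunks_of_four := by
  intro arr _ hpre
  unfold Pre_reverse_chunks_of_four at hpre
  unfold Spec_reverse_chunks_of_four reverse_chunks_of_four_alt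
  rw [if_neg (by omega), A_eq_revQuads arr hpre]
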